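-- pv_equiv track=rewrite | github.com/pypi-data/pypi-mirror-377 | packages/pirateweather-translations/pirateweather_translations-1.3.0-py3-none-any.whl/pirateweather_translations/lang/fr.py | join_with_shared_prefix
-- ===== SOURCE A (Python) =====
-- def join_with_shared_prefix(a, b, joiner):
--     i = 0
--     min_len = min(len(a), len(b))
--
--     while i < min_len and ord(a[i]) == ord(b[i]):
--         i += 1
--
--     # Move back until we hit a space or start of string
--     while i > 0 and (i > len(a) or (i <= len(a) and a[i - 1] != " ")):
--         i -= 1
--
--     # Return the joined string
--     return a[:i] + a[i:] + joiner + b[i:]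
-- ===== SOURCE B (Python) =====
-- def join_with_shared_prefix(a, b, joiner):
--     # One forward pass: while still inside the shared prefix, remember the
--     # position just after the most recent space (the word boundary).
--     # No backtracking loop and no prefix slicing of a are needed.
--     idx = 0
--     for i in range(min(len(a), len(b))):
--         if a[i] != b[i]:
--             break
--         if a[i] == " ":
--             idx = i + 1
--     return a + joiner + b[idx:]
-- ===== Notes on version B (the rewrite author's own statement) =====
-- stated objective: simpler
-- what changed: Fuses A's two staged while loops (forward char-compare walk, then a backtracking walk to a space) into one forward pass that maintains the word-boundary accumulator idx while scanning the shared prefix, and returns a + joiner + b[idx:] with no backtracking, no ord() calls and no slicing of a.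
import Mathlib
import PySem

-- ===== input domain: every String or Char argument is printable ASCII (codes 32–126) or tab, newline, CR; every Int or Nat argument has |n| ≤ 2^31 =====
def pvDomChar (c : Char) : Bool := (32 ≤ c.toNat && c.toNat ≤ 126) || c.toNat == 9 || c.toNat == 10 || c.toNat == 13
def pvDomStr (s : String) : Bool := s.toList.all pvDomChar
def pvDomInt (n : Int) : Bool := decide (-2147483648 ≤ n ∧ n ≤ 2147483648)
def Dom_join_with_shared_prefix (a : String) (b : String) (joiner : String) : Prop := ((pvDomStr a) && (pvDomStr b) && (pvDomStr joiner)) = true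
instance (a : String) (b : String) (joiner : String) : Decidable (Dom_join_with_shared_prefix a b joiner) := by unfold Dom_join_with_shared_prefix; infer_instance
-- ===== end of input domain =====

-- B fuses A's two staged while loops (forward compare, then backtracking to a
-- space) into one forward pass maintaining the word-boundary accumulator idx
-- (objective: simpler).

-- ===== PORT A =====
-- first while loop: advance i while i < min_len and a[i] == b[i]
-- (indices are in range throughout, so getD's default is never read)
def pvLoop1 (la lb : List Char) (minLen i : Nat) : Nat :=
  if i < minLen ∧ la.getD i ' ' = lb.getD i ' ' then pvLoop1 la lb minLen (i + 1) else i
termination_by minLen - i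
decreasing_by omega

-- second while loop: move back until a space or the start of the string
def pvLoop2 (la : List Char) (i : Nat) : Nat :=
  if 0 < i ∧ (la.length < i ∨ (i ≤ la.length ∧ la.getD (i - 1) ' ' ≠ ' ')) then pvLoop2 la (i - 1) else i
termination_by i
decreasing_by omega

def join_with_shared_prefix (a : String) (b : String) (joiner : String) : String :=
  let la := a.toList
  let lb := b.toList
  let minLen := min la.length lb.length
  let i0 := pvLoop1 la lb minLen 0
  let i := pvLoop2 la i0
  -- a[:i] + a[i:] + joiner + b[i:]  (0 ≤ i, so the slices are take/drop)
  String.ofList (la.take i) ++ String.ofList (la.drop i) ++ joiner ++ String.ofList (lb.drop i)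

-- ===== PORT B =====
-- Source B's single for-loop over range(min(len(a), len(b))) with break,
-- carrying the accumulator idx (indices in range, so getD's default is unread)
def pvScanB (la lb : List Char) (minLen i idx : Nat) : Nat :=
  if i < minLen then
    if la.getD i ' ' ≠ lb.getD i ' ' then idx
    else pvScanB la lb minLen (i + 1) (if la.getD i ' ' = ' ' then i + 1 else idx)
  else idx
termination_by minLen - i
decreasing_by omega

def join_with_shared_prefix_alt (a : String) (b : String) (joiner : String) : String :=
  let la := a.toList
  let lb := b.toList
  let idx := pvScanB la lb (min la.length lb.length) 0 0
  -- b[idx:] with 0 ≤ idx is a drop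
  a ++ joiner ++ String.ofList (lb.drop idx)

-- ===== PRECONDITION & SPEC =====
def Spec_join_with_shared_prefix (a : String) (b : String) (joiner : String) (out : String) : Prop := out = join_with_shared_prefix_alt a b joiner
instance (a : String) (b : String) (joiner : String) (out : String) : Decidable (Spec_join_with_shared_prefix a b joiner out) := by unfold Spec_join_with_shared_prefix; infer_instance

-- ===== CLAIM (what is proved, stated in full; the proofs are below) =====
def Claim_equal_join_with_shared_prefix : Prop := ∀ (a : String) (b : String) (joiner : String), Dom_join_with_shared_prefix a b joiner → Spec_join_with_shared_prefix a b joiner (join_with_shared_prefix a b joiner)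

-- ===== LEMMAS AND PROOFS =====

-- length of the shared prefix of a zipped pair list (reference function)
def pvCpl : List (Char × Char) → Nat
  | [] => 0
  | (x, y) :: t => if x = y then pvCpl t + 1 else 0

-- position right after the last space (reference function): fold over chars
def pvLastSp : List Char → Nat → Nat → Nat
  | [], _, idx => idx
  | c :: t, i, idx => pvLastSp t (i + 1) (if c = ' ' then i + 1 else idx)

-- loop 1 computes i + (length of the shared prefix of the dropped tails)
theorem pvLoop1_eq (la lb : List Char) (i : Nat) (h : i ≤ (la.zip lb).length) :
    pvLoop1 la lb (min la.length lb.length) i = i + pvCpl ((la.zip lb).drop i) := by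
  have hlen : (la.zip lb).length = min la.length lb.length := List.length_zip ..
  generalize hd : min la.length lb.length - i = d
  induction d generalizing i with
  | zero =>
    have hi : i = min la.length lb.length := by omega
    rw [pvLoop1]
    have : ¬ (i < min la.length lb.length ∧ la.getD i ' ' = lb.getD i ' ') := by
      intro ⟨h1, _⟩; omega
    rw [if_neg this]
    have : (la.zip lb).drop i = [] := List.drop_eq_nil_of_le (by omega)
    simp [this, pvCpl]
  | succ d ih =>
    have hi : i < (la.zip lb).length := by omega
    have hdrop : (la.zip lb).drop i = (la.zip lb)[i] :: (la.zip lb).drop (i + 1) :=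
      List.drop_eq_getElem_cons hi
    have hia : i < la.length := by omega
    have hib : i < lb.length := by omega
    have hget : (la.zip lb)[i] = (la[i], lb[i]) := List.getElem_zip ..
    rw [pvLoop1]
    by_cases heq : la.getD i ' ' = lb.getD i ' '
    · rw [if_pos ⟨by omega, heq⟩, ih (i + 1) (by omega) (by omega)]
      rw [hdrop, hget]
      have : la[i] = lb[i] := by
        rwa [List.getD_eq_getElem la ' ' hia, List.getD_eq_getElem lb ' ' hib] at heq
      simp [pvCpl, this]
      omega
    · rw [if_neg (by intro ⟨_, h2⟩; exact heq h2)]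
      rw [hdrop, hget]
      have : la[i] ≠ lb[i] := by
        rw [List.getD_eq_getElem la ' ' hia, List.getD_eq_getElem lb ' ' hib] at heq
        exact heq
      simp [pvCpl, this]

theorem pvLastSp_append (l : List Char) (c : Char) (i idx : Nat) :
    pvLastSp (l ++ [c]) i idx =
      if c = ' ' then i + l.length + 1 else pvLastSp l i idx := by
  induction l generalizing i idx with
  | nil => simp [pvLastSp]
  | cons x t ih =>
    simp only [List.cons_append, pvLastSp, ih]
    split
    · simp; omega
    · rfl

-- loop 2 from any n ≤ |la| lands right after the last space of la.take n
theorem pvLoop2_eq (la : List Char) (n : Nat) (h : n ≤ la.length) :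
    pvLoop2 la n = pvLastSp (la.take n) 0 0 := by
  induction n with
  | zero => rw [pvLoop2]; simp [pvLastSp]
  | succ n ih =>
    have hn : n < la.length := by omega
    have htake : la.take (n + 1) = la.take n ++ [la[n]] := List.take_succ_eq_append_getElem hn
    rw [htake, pvLastSp_append]
    have hg : la.getD n ' ' = la[n] := List.getD_eq_getElem la ' ' hn
    by_cases hsp : la[n] = ' '
    · rw [if_pos hsp, pvLoop2]
      simp only [Nat.add_sub_cancel]
      have hc : ¬ (0 < n + 1 ∧ (la.length < n + 1 ∨ (n + 1 ≤ la.length ∧ la.getD n ' ' ≠ ' '))) := by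
        intro ⟨_, h2⟩
        rcases h2 with h2 | ⟨_, h3⟩
        · omega
        · exact h3 (by rw [hg]; exact hsp)
      rw [if_neg hc]
      simp [List.length_take]
      omega
    · rw [if_neg hsp, pvLoop2]
      simp only [Nat.add_sub_cancel]
      have hc : (0 < n + 1 ∧ (la.length < n + 1 ∨ (n + 1 ≤ la.length ∧ la.getD n ' ' ≠ ' '))) := by
        refine ⟨by omega, Or.inr ⟨by omega, ?_⟩⟩
        rw [hg]; exact hsp
      rw [if_pos hc]
      exact ih (by omega)

-- the fused scan over the dropped tail, as a recursion on the pair list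
def pvAcc : List (Char × Char) → Nat → Nat → Nat
  | [], _, idx => idx
  | (x, y) :: t, i, idx =>
    if x ≠ y then idx else pvAcc t (i + 1) (if x = ' ' then i + 1 else idx)

-- B's index loop equals the pair-list recursion on the dropped zip
theorem pvScanB_eq (la lb : List Char) (i idx : Nat) (h : i ≤ (la.zip lb).length) :
    pvScanB la lb (min la.length lb.length) i idx = pvAcc ((la.zip lb).drop i) i idx := by
  have hlen : (la.zip lb).length = min la.length lb.length := List.length_zip ..
  generalize hd : min la.length lb.length - i = d
  induction d generalizing i idx with
  | zero =>
    rw [pvScanB, if_neg (by omega)]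
    have : (la.zip lb).drop i = [] := List.drop_eq_nil_of_le (by omega)
    simp [this, pvAcc]
  | succ d ih =>
    have hi : i < (la.zip lb).length := by omega
    have hdrop : (la.zip lb).drop i = (la.zip lb)[i] :: (la.zip lb).drop (i + 1) :=
      List.drop_eq_getElem_cons hi
    have hia : i < la.length := by omega
    have hib : i < lb.length := by omega
    have hget : (la.zip lb)[i] = (la[i], lb[i]) := List.getElem_zip ..
    have hga : la.getD i ' ' = la[i] := List.getD_eq_getElem la ' ' hia
    have hgb : lb.getD i ' ' = lb[i] := List.getD_eq_getElem lb ' ' hib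
    rw [pvScanB, if_pos (by omega), hdrop, hget, hga, hgb]
    by_cases heq : la[i] = lb[i]
    · rw [if_neg (by simpa using heq), ih (i + 1) _ (by omega) (by omega)]
      simp [pvAcc, heq]
    · rw [if_pos (by simpa using heq)]
      simp [pvAcc, heq]

-- the fused recursion equals: last space inside the shared prefix
theorem pvAcc_eq (l : List (Char × Char)) (i idx : Nat) :
    pvAcc l i idx = pvLastSp ((l.take (pvCpl l)).map Prod.fst) i idx := by
  induction l generalizing i idx with
  | nil => simp [pvAcc, pvCpl, pvLastSp]
  | cons p t ih =>
    obtain ⟨x, y⟩ := p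
    by_cases heq : x = y
    · have h1 : pvAcc ((x, y) :: t) i idx = pvAcc t (i + 1) (if x = ' ' then i + 1 else idx) := by
        simp [pvAcc, heq]
      have h2 : pvCpl ((x, y) :: t) = pvCpl t + 1 := by simp [pvCpl, heq]
      rw [h1, h2, List.take_succ_cons]
      simp only [List.map_cons, pvLastSp]
      exact ih ..
    · simp [pvAcc, pvCpl, heq, pvLastSp]

theorem pvCpl_le (l : List (Char × Char)) : pvCpl l ≤ l.length := by
  induction l with
  | nil => simp [pvCpl]
  | cons p t ih => obtain ⟨x, y⟩ := p; simp only [pvCpl, List.length_cons]; split <;> omega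

-- the shared-prefix part of the zip projects to the same prefix of la
theorem pvTake_zip_fst (la : List Char) : ∀ (lb : List Char) (n : Nat),
    n ≤ min la.length lb.length → ((la.zip lb).take n).map Prod.fst = la.take n := by
  induction la with
  | nil => intro lb n h; simp at h; simp [h]
  | cons x ta ih =>
    intro lb n h
    cases lb with
    | nil => simp at h; simp [h]
    | cons y tb =>
      cases n with
      | zero => simp
      | succ m =>
        simp only [List.zip_cons_cons, List.take_succ_cons, List.map_cons]
        rw [ih tb m (by simp at h ⊢; omega)]

theorem pvString_take_drop (s : String) (i : Nat) :
    String.ofList (s.toList.take i) ++ String.ofList (s.toList.drop i) = s := by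
  rw [← String.ofList_append, List.take_append_drop, String.ofList_toList]

-- ===== VERDICT (by name: the statement is the Claim_ definition above) =====
theorem join_with_shared_prefix_spec : Claim_equal_join_with_shared_prefix := by
  intro a b joiner _
  unfold Spec_join_with_shared_prefix join_with_shared_prefix join_with_shared_prefix_alt
  simp only
  set la := a.toList
  set lb := b.toList
  have hzlen : (la.zip lb).length = min la.length lb.length := List.length_zip ..
  have hcpl : pvCpl (la.zip lb) ≤ min la.length lb.length := by
    have := pvCpl_le (la.zip lb); omega
  have hA : pvLoop1 la lb (min la.length lb.length) 0 = pvCpl (la.zip lb) := by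
    simpa using pvLoop1_eq la lb 0 (by omega)
  have hB : pvScanB la lb (min la.length lb.length) 0 0 = pvLastSp (la.take (pvCpl (la.zip lb))) 0 0 := by
    rw [pvScanB_eq la lb 0 0 (by omega)]
    simp only [List.drop_zero]
    rw [pvAcc_eq, pvTake_zip_fst la lb _ hcpl]
  rw [hA, pvLoop2_eq la _ (by omega), hB, pvString_take_drop]
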